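-- pv_equiv track=rewrite | github.com/makoantz/battleshipsim | backend/app/algorithms/p2m2_optimized.py | _get_gap_filling_candidates
-- ===== SOURCE A (Python) =====
-- from typing import List, Tuple, Set
--
-- def _get_gap_filling_candidates(group: Set[Tuple[int, int]]) -> List[Tuple[int, int]]:
--     """Get gap-filling candidates for alternating hit patterns."""
--     rows = {r for r, c in group}
--     cols = {c for r, c in group}
--     candidates = []
--
--     if len(rows) == 1:
--         # Horizontal alternating hits - fill gaps
--         row = list(rows)[0]
--         cols_sorted = sorted([c for r, c in group])
--         min_col, max_col = cols_sorted[0], cols_sorted[-1]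
--
--         # Fill gaps first (PRIORITY 1)
--         for c in range(min_col + 1, max_col):
--             if (row, c) not in group:
--                 candidates.append((row, c))
--
--         # Then extend ends (PRIORITY 2)
--         candidates.extend([(row, min_col - 1), (row, max_col + 1)])
--
--     elif len(cols) == 1:
--         # Vertical alternating hits - fill gaps
--         col = list(cols)[0]
--         rows_sorted = sorted([r for r, c in group])
--         min_row, max_row = rows_sorted[0], rows_sorted[-1]
--
--         # Fill gaps first (PRIORITY 1)
--         for r in range(min_row + 1, max_row):
--             if (r, col) not in group:
--                 candidates.append((r, col))
--
--         # Then extend ends (PRIORITY 2)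
--         candidates.extend([(min_row - 1, col), (max_row + 1, col)])
--
--     return candidates
-- ===== SOURCE B (Python) =====
-- from typing import List, Tuple, Set
--
-- def _get_gap_filling_candidates(group: Set[Tuple[int, int]]) -> List[Tuple[int, int]]:
--     """Gap-filling candidates: emit cells strictly between consecutive sorted
--     coordinates (the gaps, already in ascending order), then the two extensions."""
--     if not group:
--         return []
--     rows = sorted({r for r, c in group})
--     cols = sorted({c for r, c in group})
--     if len(rows) == 1:
--         row = rows[0]
--         gaps = [(row, c) for a, b in zip(cols, cols[1:]) for c in range(a + 1, b)]
--         return gaps + [(row, cols[0] - 1), (row, cols[-1] + 1)]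
--     if len(cols) == 1:
--         col = cols[0]
--         gaps = [(r, col) for a, b in zip(rows, rows[1:]) for r in range(a + 1, b)]
--         return gaps + [(rows[0] - 1, col), (rows[-1] + 1, col)]
--     return []
-- ===== Notes on version B (the rewrite author's own statement) =====
-- stated objective: alternative
-- what changed: Instead of scanning every cell of range(min+1,max) and testing membership in the group, B sorts the distinct coordinates once and emits the cells strictly between each pair of consecutive sorted coordinates (exactly the gaps, already in ascending order), then appends the two extensions.
import Mathlib
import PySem

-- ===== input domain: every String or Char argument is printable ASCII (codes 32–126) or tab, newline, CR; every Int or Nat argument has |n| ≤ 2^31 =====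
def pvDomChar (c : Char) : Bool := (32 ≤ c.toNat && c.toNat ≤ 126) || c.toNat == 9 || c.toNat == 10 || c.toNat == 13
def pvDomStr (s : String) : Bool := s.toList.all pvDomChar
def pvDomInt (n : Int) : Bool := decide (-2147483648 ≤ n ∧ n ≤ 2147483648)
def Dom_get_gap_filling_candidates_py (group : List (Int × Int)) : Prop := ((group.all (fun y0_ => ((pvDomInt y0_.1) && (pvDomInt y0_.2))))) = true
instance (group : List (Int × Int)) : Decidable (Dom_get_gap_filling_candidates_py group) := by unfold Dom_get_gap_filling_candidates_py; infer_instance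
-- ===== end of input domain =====

-- B replaces A's scan of range(min+1,max) with a membership test per cell by emitting,
-- for each pair of consecutive sorted distinct coordinates, the cells strictly between
-- them — the gaps directly, in the same ascending order (objective: alternative).

-- ===== PORT A =====
def get_gap_filling_candidates_py (group : List (Int × Int)) : List (Int × Int) :=
  let rows := PySem.Set.ofList (group.map (fun p => p.1))
  let cols := PySem.Set.ofList (group.map (fun p => p.2))
  let candidates : List (Int × Int) := []
  if rows.length = 1 then
    let row := rows.headD 0                                   -- list(rows)[0]; rows nonempty in this branch
    let cols_sorted := PySem.List.sorted (group.map (fun p => p.2)) (fun x => x)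
    let min_col := cols_sorted.headD 0                        -- cols_sorted[0];  nonempty in this branch
    let max_col := cols_sorted.getLastD 0                     -- cols_sorted[-1]; nonempty in this branch
    let candidates := (PySem.List.pyRange (min_col + 1) max_col).foldl
      (fun acc c => if !decide ((row, c) ∈ group) then acc ++ [(row, c)] else acc) candidates
    candidates ++ [(row, min_col - 1), (row, max_col + 1)]
  else if cols.length = 1 then
    let col := cols.headD 0
    let rows_sorted := PySem.List.sorted (group.map (fun p => p.1)) (fun x => x)
    let min_row := rows_sorted.headD 0
    let max_row := rows_sorted.getLastD 0
    let candidates := (PySem.List.pyRange (min_row + 1) max_row).foldl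
      (fun acc r => if !decide ((r, col) ∈ group) then acc ++ [(r, col)] else acc) candidates
    candidates ++ [(min_row - 1, col), (max_row + 1, col)]
  else candidates

-- ===== PORT B =====
def get_gap_filling_candidates_py_alt (group : List (Int × Int)) : List (Int × Int) :=
  if group = [] then []
  else
    let rows := PySem.List.sorted (PySem.Set.ofList (group.map (fun p => p.1))) (fun x => x)
    let cols := PySem.List.sorted (PySem.Set.ofList (group.map (fun p => p.2))) (fun x => x)
    if rows.length = 1 then
      let row := rows.headD 0
      let gaps := (cols.zip cols.tail).flatMap
        (fun ab => (PySem.List.pyRange (ab.1 + 1) ab.2).map (fun c => (row, c)))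
      gaps ++ [(row, cols.headD 0 - 1), (row, cols.getLastD 0 + 1)]
    else if cols.length = 1 then
      let col := cols.headD 0
      let gaps := (rows.zip rows.tail).flatMap
        (fun ab => (PySem.List.pyRange (ab.1 + 1) ab.2).map (fun r => (r, col)))
      gaps ++ [(rows.headD 0 - 1, col), (rows.getLastD 0 + 1, col)]
    else []

-- ===== PRECONDITION & SPEC =====
def Spec_get_gap_filling_candidates_py (group : List (Int × Int)) (out : List (Int × Int)) : Prop := out = get_gap_filling_candidates_py_alt group
instance (group : List (Int × Int)) (out : List (Int × Int)) : Decidable (Spec_get_gap_filling_candidates_py group out) := by unfold Spec_get_gap_filling_candidates_py; infer_instance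

-- ===== CLAIM (what is proved, stated in full; the proofs are below) =====
def Claim_equal_get_gap_filling_candidates_py : Prop := ∀ (group : List (Int × Int)), Dom_get_gap_filling_candidates_py group → Spec_get_gap_filling_candidates_py group (get_gap_filling_candidates_py group)

-- ===== LEMMAS AND PROOFS =====

-- a ≤ last of a ≤-sorted list starting at a
lemma pv_last_ge_head : ∀ (l : List Int) (a d : Int),
    (a :: l).Pairwise (fun x y => x ≤ y) → a ≤ (a :: l).getLastD d := by
  intro l
  induction l with
  | nil => intro a d _; simp
  | cons b t ih =>
    intro a d hp
    rw [List.pairwise_cons] at hp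
    have hab : a ≤ b := hp.1 b (by simp)
    have := ih b d hp.2
    calc a ≤ b := hab
      _ ≤ (b :: t).getLastD d := this
      _ = (a :: b :: t).getLastD d := by simp

-- every member of a ≤-sorted list is ≤ its last element
lemma pv_last_max : ∀ (l : List Int) (a d x : Int),
    (a :: l).Pairwise (fun x y => x ≤ y) → x ∈ a :: l → x ≤ (a :: l).getLastD d := by
  intro l
  induction l with
  | nil => intro a d x _ hx; simp at hx; simp [hx]
  | cons b t ih =>
    intro a d x hp hx
    rw [List.pairwise_cons] at hp
    rcases List.mem_cons.mp hx with rfl | hx'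
    · exact pv_last_ge_head _ _ _ (List.pairwise_cons.mpr hp)
    · have := ih b d x hp.2 hx'
      calc x ≤ (b :: t).getLastD d := this
        _ = (a :: b :: t).getLastD d := by simp

-- head of sorted(xs) = head of sorted(set(xs))  (both are the minimum)
lemma pv_head_sorted_dedup (xs : List Int) (h : xs ≠ []) :
    (PySem.List.sorted xs (fun x => x)).headD 0
      = (PySem.List.sorted (PySem.Set.ofList xs) (fun x => x)).headD 0 := by
  rcases hs : PySem.List.sorted xs (fun x => x) with _ | ⟨m, t⟩
  · exact absurd (by simpa [hs] using PySem.List.length_sorted xs (fun x => x) false)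
      (by simpa using fun h' => h (List.length_eq_zero_iff.mp h'.symm))
  rcases hd : PySem.List.sorted (PySem.Set.ofList xs) (fun x => x) with _ | ⟨m', t'⟩
  · exfalso
    rcases List.exists_mem_of_ne_nil xs h with ⟨y, hy⟩
    have : y ∈ PySem.List.sorted (PySem.Set.ofList xs) (fun x => x) := by
      rw [PySem.List.mem_sorted]; exact (PySem.Set.mem_ofList xs y).mpr hy
    simp [hd] at this
  have hm : m ∈ xs := by
    have : m ∈ PySem.List.sorted xs (fun x => x) := by simp [hs]
    rwa [PySem.List.mem_sorted] at this
  have hm' : m' ∈ xs := by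
    have : m' ∈ PySem.List.sorted (PySem.Set.ofList xs) (fun x => x) := by simp [hd]
    rw [PySem.List.mem_sorted] at this
    exact (PySem.Set.mem_ofList xs m').mp this
  have h1 : m ≤ m' := PySem.List.key_head_sorted_le xs (fun x => x) hs m' hm'
  have h2 : m' ≤ m := PySem.List.key_head_sorted_le (PySem.Set.ofList xs) (fun x => x) hd m
    ((PySem.Set.mem_ofList xs m).mpr hm)
  simp [le_antisymm h1 h2]

-- last of sorted(xs) = last of sorted(set(xs))  (both are the maximum)
lemma pv_last_sorted_dedup (xs : List Int) (h : xs ≠ []) :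
    (PySem.List.sorted xs (fun x => x)).getLastD 0
      = (PySem.List.sorted (PySem.Set.ofList xs) (fun x => x)).getLastD 0 := by
  rcases hs : PySem.List.sorted xs (fun x => x) with _ | ⟨m, t⟩
  · exact absurd (by simpa [hs] using PySem.List.length_sorted xs (fun x => x) false)
      (by simpa using fun h' => h (List.length_eq_zero_iff.mp h'.symm))
  rcases hd : PySem.List.sorted (PySem.Set.ofList xs) (fun x => x) with _ | ⟨m', t'⟩
  · exfalso
    rcases List.exists_mem_of_ne_nil xs h with ⟨y, hy⟩
    have : y ∈ PySem.List.sorted (PySem.Set.ofList xs) (fun x => x) := by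
      rw [PySem.List.mem_sorted]; exact (PySem.Set.mem_ofList xs y).mpr hy
    simp [hd] at this
  have hps : (m :: t).Pairwise (fun x y : Int => x ≤ y) := by
    have := PySem.List.sorted_pairwise xs (fun x : Int => x); rwa [hs] at this
  have hpd : (m' :: t').Pairwise (fun x y : Int => x ≤ y) := by
    have := PySem.List.sorted_pairwise (PySem.Set.ofList xs) (fun x : Int => x); rwa [hd] at this
  have hLmem : (m :: t).getLastD 0 ∈ xs := by
    have h0 : (m :: t).getLastD 0 ∈ m :: t := by
      rw [List.getLastD_cons]; exact List.getLastD_mem_cons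
    have h2 : (m :: t).getLastD 0 ∈ PySem.List.sorted xs (fun x => x) := by rw [hs]; exact h0
    rwa [PySem.List.mem_sorted] at h2
  have hLmem' : (m' :: t').getLastD 0 ∈ xs := by
    have h0 : (m' :: t').getLastD 0 ∈ m' :: t' := by
      rw [List.getLastD_cons]; exact List.getLastD_mem_cons
    have h2 : (m' :: t').getLastD 0 ∈ PySem.List.sorted (PySem.Set.ofList xs) (fun x => x) := by
      rw [hd]; exact h0
    rw [PySem.List.mem_sorted] at h2
    exact (PySem.Set.mem_ofList _ _).mp h2
  have h1 : (m :: t).getLastD 0 ≤ (m' :: t').getLastD 0 := by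
    apply pv_last_max t' m' 0 _ hpd
    have : (m :: t).getLastD 0 ∈ PySem.List.sorted (PySem.Set.ofList xs) (fun x => x) := by
      rw [PySem.List.mem_sorted]; exact (PySem.Set.mem_ofList _ _).mpr hLmem
    rwa [hd] at this
  have h2 : (m' :: t').getLastD 0 ≤ (m :: t).getLastD 0 := by
    apply pv_last_max t m 0 _ hps
    have : (m' :: t').getLastD 0 ∈ PySem.List.sorted xs (fun x => x) := by
      rw [PySem.List.mem_sorted]; exact hLmem'
    rwa [hs] at this
  exact le_antisymm h1 h2

-- core: on a strictly increasing list, the non-members of the open span are exactly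
-- the union of the open intervals between consecutive elements, in ascending order
lemma pv_gaps_core : ∀ (t : List Int) (a : Int), (a :: t).Pairwise (fun x y => x < y) →
    (PySem.List.pyRange (a + 1) ((a :: t).getLastD 0)).filter (fun c => !decide (c ∈ a :: t))
      = ((a :: t).zip t).flatMap (fun p => PySem.List.pyRange (p.1 + 1) p.2) := by
  intro t
  induction t with
  | nil =>
    intro a _
    simp [PySem.List.pyRange_one_eq_nil (by simp : (a : Int) ≤ a + 1)]
  | cons b t ih =>
    intro a hp
    rw [List.pairwise_cons] at hp
    have hab : a < b := hp.1 b (by simp)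
    have hpbt : (b :: t).Pairwise (fun x y : Int => x < y) := hp.2
    have hble : b ≤ (b :: t).getLastD 0 :=
      pv_last_ge_head t b 0 (hpbt.imp (fun h => le_of_lt h))
    have hgl : (a :: b :: t).getLastD 0 = (b :: t).getLastD 0 := by
      simp
    rw [hgl,
      PySem.List.pyRange_one_append (a + 1) b ((b :: t).getLastD 0) (by omega) hble,
      List.filter_append]
    have hpart1 : (PySem.List.pyRange (a + 1) b).filter (fun c => !decide (c ∈ a :: b :: t))
        = PySem.List.pyRange (a + 1) b := by
      rw [List.filter_eq_self]
      intro c hc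
      rw [PySem.List.mem_pyRange_one] at hc
      have hcb : ∀ y ∈ t, b < y := fun y hy => (List.pairwise_cons.mp hpbt).1 y hy
      have hnm : ¬ (c ∈ a :: b :: t) := by
        intro hmem
        rcases List.mem_cons.mp hmem with rfl | hmem'
        · omega
        rcases List.mem_cons.mp hmem' with rfl | hmem''
        · omega
        · have := hcb c hmem''; omega
      simp [hnm]
    have hpart2 : (PySem.List.pyRange b ((b :: t).getLastD 0)).filter
          (fun c => !decide (c ∈ a :: b :: t))
        = (PySem.List.pyRange (b + 1) ((b :: t).getLastD 0)).filter
          (fun c => !decide (c ∈ b :: t)) := by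
      rcases lt_or_eq_of_le hble with hlt | heq
      · rw [PySem.List.pyRange_one_cons hlt, List.filter_cons]
        have hb : (!decide (b ∈ a :: b :: t)) = false := by simp
        rw [hb]
        simp only [Bool.false_eq_true, if_false]
        apply List.filter_congr
        intro c hc
        rw [PySem.List.mem_pyRange_one] at hc
        have hca : c ≠ a := by omega
        simp [List.mem_cons, hca]
      · rw [← heq, PySem.List.pyRange_one_eq_nil (le_refl b),
          PySem.List.pyRange_one_eq_nil (by omega : (b : Int) ≤ b + 1)]
        rfl
    rw [hpart1, hpart2, ih b hpbt]
    rfl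

-- one branch of A equals the corresponding branch of B, for an abstract cell builder f
lemma pv_branch_eq (group : List (Int × Int)) (vals : List Int) (f : Int → Int × Int)
    (hv : vals ≠ []) (hmem : ∀ c, (f c ∈ group) ↔ c ∈ vals) :
    ((PySem.List.pyRange ((PySem.List.sorted vals (fun x => x)).headD 0 + 1)
        ((PySem.List.sorted vals (fun x => x)).getLastD 0)).foldl
      (fun acc c => if !decide (f c ∈ group) then acc ++ [f c] else acc) ([] : List (Int × Int)))
      ++ [f ((PySem.List.sorted vals (fun x => x)).headD 0 - 1),
          f ((PySem.List.sorted vals (fun x => x)).getLastD 0 + 1)]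
    = ((PySem.List.sorted (PySem.Set.ofList vals) (fun x => x)).zip
          (PySem.List.sorted (PySem.Set.ofList vals) (fun x => x)).tail).flatMap
        (fun ab => (PySem.List.pyRange (ab.1 + 1) ab.2).map f)
      ++ [f ((PySem.List.sorted (PySem.Set.ofList vals) (fun x => x)).headD 0 - 1),
          f ((PySem.List.sorted (PySem.Set.ofList vals) (fun x => x)).getLastD 0 + 1)] := by
  rw [pv_head_sorted_dedup vals hv, pv_last_sorted_dedup vals hv]
  rw [PySem.List.foldl_append_if (fun c => !decide (f c ∈ group)) f _ []]
  rw [List.nil_append]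
  congr 1
  rcases hd : PySem.List.sorted (PySem.Set.ofList vals) (fun x => x) with _ | ⟨m, t⟩
  · exfalso
    rcases List.exists_mem_of_ne_nil vals hv with ⟨y, hy⟩
    have : y ∈ PySem.List.sorted (PySem.Set.ofList vals) (fun x => x) := by
      rw [PySem.List.mem_sorted]; exact (PySem.Set.mem_ofList vals y).mpr hy
    simp [hd] at this
  have hpd : (m :: t).Pairwise (fun x y : Int => x < y) := by
    have := PySem.List.sorted_ofList_pairwise_lt vals; rwa [hd] at this
  have hfc : (PySem.List.pyRange ((m :: t).headD 0 + 1) ((m :: t).getLastD 0)).filter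
        (fun c => !decide (f c ∈ group))
      = (PySem.List.pyRange ((m :: t).headD 0 + 1) ((m :: t).getLastD 0)).filter
        (fun c => !decide (c ∈ m :: t)) := by
    apply List.filter_congr
    intro c _
    have : (f c ∈ group) ↔ c ∈ m :: t := by
      rw [hmem c, ← PySem.Set.mem_ofList vals c,
        ← PySem.List.mem_sorted (PySem.Set.ofList vals) (fun x => x) false c, hd]
    simp [this]
  rw [hfc]
  have := pv_gaps_core t m hpd
  simp only [List.headD_cons] at *
  rw [this, List.map_flatMap]
  rfl

-- characterisation of the elements of a singleton coordinate set
lemma pv_all_eq_of_ofList_single {l : List Int} {x : Int}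
    (h : PySem.Set.ofList l = [x]) : ∀ y ∈ l, y = x := by
  intro y hy
  have : y ∈ PySem.Set.ofList l := (PySem.Set.mem_ofList l y).mpr hy
  rw [h] at this; simpa using this

-- ===== VERDICT (by name: the statement is the Claim_ definition above) =====
theorem get_gap_filling_candidates_py_spec : Claim_equal_get_gap_filling_candidates_py := by
  intro group _
  unfold Spec_get_gap_filling_candidates_py
  unfold get_gap_filling_candidates_py get_gap_filling_candidates_py_alt
  rcases hg : group with _ | ⟨p0, g0⟩
  · simp [PySem.Set.ofList]
  rw [← hg]
  have hgne : group ≠ [] := by rw [hg]; simp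
  rw [if_neg hgne]
  simp only [PySem.List.length_sorted]
  by_cases hr : (PySem.Set.ofList (group.map (fun p => p.1))).length = 1
  · rw [if_pos hr, if_pos hr]
    rcases List.length_eq_one_iff.mp hr with ⟨row, hrow⟩
    have hrowB : (PySem.List.sorted (PySem.Set.ofList (group.map (fun p => p.1))) (fun x => x)).headD 0 = row := by
      rw [hrow, PySem.List.sorted_eq_self_of_pairwise _ _ (by simp)]; rfl
    have hrowA : (PySem.Set.ofList (group.map (fun p => p.1))).headD 0 = row := by
      rw [hrow]; rfl
    have hvne : group.map (fun p => p.2) ≠ [] := by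
      simp [hg]
    have hmem : ∀ c, ((row, c) ∈ group) ↔ c ∈ group.map (fun p => p.2) := by
      intro c
      constructor
      · intro h; exact List.mem_map.mpr ⟨(row, c), h, rfl⟩
      · intro h
        rcases List.mem_map.mp h with ⟨p, hp, hpc⟩
        have hp1 : p.1 = row :=
          pv_all_eq_of_ofList_single hrow p.1 (List.mem_map.mpr ⟨p, hp, rfl⟩)
        have : p = (row, c) := by
          rcases p with ⟨pr, pc⟩; simp at hp1 hpc; simp [hp1, hpc]
        rwa [this] at hp
    simp only [hrowA, hrowB]
    exact pv_branch_eq group (group.map (fun p => p.2)) (fun c => (row, c)) hvne hmem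
  · rw [if_neg hr, if_neg hr]
    by_cases hc : (PySem.Set.ofList (group.map (fun p => p.2))).length = 1
    · rw [if_pos hc, if_pos hc]
      rcases List.length_eq_one_iff.mp hc with ⟨col, hcol⟩
      have hcolB : (PySem.List.sorted (PySem.Set.ofList (group.map (fun p => p.2))) (fun x => x)).headD 0 = col := by
        rw [hcol, PySem.List.sorted_eq_self_of_pairwise _ _ (by simp)]; rfl
      have hcolA : (PySem.Set.ofList (group.map (fun p => p.2))).headD 0 = col := by
        rw [hcol]; rfl
      have hvne : group.map (fun p => p.1) ≠ [] := by
        simp [hg]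
      have hmem : ∀ r, ((r, col) ∈ group) ↔ r ∈ group.map (fun p => p.1) := by
        intro r
        constructor
        · intro h; exact List.mem_map.mpr ⟨(r, col), h, rfl⟩
        · intro h
          rcases List.mem_map.mp h with ⟨p, hp, hpr⟩
          have hp2 : p.2 = col :=
            pv_all_eq_of_ofList_single hcol p.2 (List.mem_map.mpr ⟨p, hp, rfl⟩)
          have : p = (r, col) := by
            rcases p with ⟨pr, pc⟩; simp at hp2 hpr; simp [hp2, hpr]
          rwa [this] at hp
      simp only [hcolA, hcolB]
      exact pv_branch_eq group (group.map (fun p => p.1)) (fun r => (r, col)) hvne hmem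
    · rw [if_neg hc, if_neg hc]
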